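-- pv_equiv track=rewrite | github.com/thanhtw/agent_sample | java_peer_review_system/core/error_injector.py | _inject_errors_programmatically
-- ===== SOURCE A (Python) =====
-- from typing import List, Dict, Any, Optional, Tuple
--
-- def _inject_errors_programmatically(code: str, errors: List[Dict[str, Any]]) -> Tuple[str, List[str]]:
--     """
--     Inject errors programmatically as a fallback method.
--
--     Args:
--         code: Original Java code snippet
--         errors: List of error dictionaries to inject
--
--     Returns:
--         Tuple of (modified code, list of injected error descriptions)
--     """
--     # This is a simplified fallback method that adds error indicators as comments
--     lines = code.split("\n")
--     injected_descriptions = []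
--
--     for i, error in enumerate(errors):
--         error_type = error["type"]
--         name = error["name"]
--         description = error["description"]
--
--         # For each error, add an indicator comment at a reasonable position in the code
--         position = min(5 + i * 3, len(lines) - 1)
--         error_comment = f"// ERROR: {name} - {description}"
--
--         # Insert the error comment
--         lines.insert(position, error_comment)
--
--         # Generate a description with location
--         line_number = position + 1  # 1-based line number
--         injected_descriptions.append(f"{name} at line {line_number}: {description}")
--
--     return "\n".join(lines), injected_descriptions
-- ===== SOURCE B (Python) =====
-- from typing import List, Dict, Any, Tuple
--
-- def _inject_errors_programmatically(code: str, errors: List[Dict[str, Any]]) -> Tuple[str, List[str]]: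
--     """Compute all insertion positions arithmetically up front (the list grows by
--     one per error, so position i is min(5 + 3*i, base + i - 1)), then build the
--     output in one merge pass instead of repeated list.insert calls."""
--     orig = code.split("\n")
--     base = len(orig)
--
--     pairs = []          # (position, comment); positions are strictly increasing
--     descriptions = []
--     for i, error in enumerate(errors):
--         name = error["name"]
--         description = error["description"]
--         position = min(5 + 3 * i, base + i - 1)
--         pairs.append((position, f"// ERROR: {name} - {description}"))
--         descriptions.append(f"{name} at line {position + 1}: {description}")
--
--     # One pass: merge the comment stream (by target index) with the original lines.
--     out = []
--     k = 0   # next pair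
--     t = 0   # next original line
--     j = 0   # current output index
--     while k < len(pairs) or t < len(orig):
--         if k < len(pairs) and pairs[k][0] == j:
--             out.append(pairs[k][1]); k += 1
--         elif t < len(orig):
--             out.append(orig[t]); t += 1
--         else:
--             out.append(pairs[k][1]); k += 1
--         j += 1
--
--     return "\n".join(out), descriptions
-- ===== Notes on version B (the rewrite author's own statement) =====
-- stated objective: alternative
-- what changed: B computes every insertion position arithmetically up front (position i = min(5+3i, base+i-1), since the list grows by one line per error) and builds the output in a single merge pass over the comment stream and the original lines, instead of A's repeated list.insert into a growing list.
import Mathlib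
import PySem

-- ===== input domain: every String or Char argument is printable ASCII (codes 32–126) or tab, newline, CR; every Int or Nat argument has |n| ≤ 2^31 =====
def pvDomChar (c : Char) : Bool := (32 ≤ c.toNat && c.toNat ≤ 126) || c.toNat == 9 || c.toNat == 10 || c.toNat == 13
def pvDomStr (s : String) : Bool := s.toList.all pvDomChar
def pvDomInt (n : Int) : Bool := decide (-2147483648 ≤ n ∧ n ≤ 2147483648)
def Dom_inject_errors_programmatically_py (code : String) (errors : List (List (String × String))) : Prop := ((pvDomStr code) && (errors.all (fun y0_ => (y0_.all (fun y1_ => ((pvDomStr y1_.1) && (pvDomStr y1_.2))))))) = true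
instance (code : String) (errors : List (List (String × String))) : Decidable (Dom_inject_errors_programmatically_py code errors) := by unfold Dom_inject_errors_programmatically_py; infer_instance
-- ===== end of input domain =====

-- B replaces A's repeated list.insert calls by computing every insertion position
-- arithmetically up front and building the output in a single merge pass (alternative
-- decomposition; equivalence of the RETURN values is what is proved).

-- ===== PORT A =====
-- Literal transliteration of A: lines = code.split("\n"); for i, error in enumerate(errors):
-- look up "type"/"name"/"description", position = min(5 + i*3, len(lines) - 1),
-- lines.insert(position, comment), append description; join at the end.
def inject_errors_programmatically_py (code : String) (errors : List (List (String × String))) : String × List String :=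
  let lines := (PySem.Str.split? code "\n").getD []
  let st := (PySem.List.enumerate errors 0).foldl
    (fun (st : List String × List String) ie =>
      let i := ie.1
      let error := PySem.Dict.mk ie.2
      let _error_type := (error.get? "type").getD ""      -- looked up (KeyError when absent: outside Pre_), unused
      let name := (error.get? "name").getD ""
      let description := (error.get? "description").getD ""
      let position := min (5 + i * 3) (PySem.List.len st.1 - 1)
      let error_comment := "// ERROR: " ++ name ++ " - " ++ description
      let lines' := PySem.List.insert st.1 position error_comment
      let line_number := position + 1
      (lines', st.2 ++ [name ++ " at line " ++ PySem.Int.toStr line_number ++ ": " ++ description]))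
    (lines, [])
  (PySem.Str.join "\n" st.1, st.2)

-- ===== PORT B =====
-- B-side helper: Source B's single merge loop over (remaining pairs, remaining original
-- lines, current output index j), transliterated with the list suffixes as the state.
def pvMergeGo : Nat → List (Int × String) → List String → Int → List String
  | 0, _, _, _ => []
  | Nat.succ fuel, pairs, orig, j =>
    match pairs, orig with
    | (p, c) :: ps, o =>
        if p = j then c :: pvMergeGo fuel ps o (j + 1)
        else
          match o with
          | x :: os => x :: pvMergeGo fuel ((p, c) :: ps) os (j + 1)
          | [] => c :: pvMergeGo fuel ps [] (j + 1)
    | [], x :: os => x :: pvMergeGo fuel [] os (j + 1)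
    | [], [] => []

-- Source B's while loop makes exactly len(pairs) + len(orig) iterations; the counter is that bound.
def pvMerge (pairs : List (Int × String)) (orig : List String) (j : Int) : List String :=
  pvMergeGo (pairs.length + orig.length) pairs orig j

-- Literal transliteration of B (Source B): one loop collecting (position, comment) pairs
-- with position = min(5 + 3*i, base + i - 1) and the descriptions, then the merge pass.
def inject_errors_programmatically_py_alt (code : String) (errors : List (List (String × String))) : String × List String :=
  let orig := (PySem.Str.split? code "\n").getD []
  let base := PySem.List.len orig
  let st := (PySem.List.enumerate errors 0).foldl
    (fun (st : List (Int × String) × List String) ie =>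
      let i := ie.1
      let error := PySem.Dict.mk ie.2
      let name := (error.get? "name").getD ""
      let description := (error.get? "description").getD ""
      let position := min (5 + 3 * i) (base + i - 1)
      (st.1 ++ [(position, "// ERROR: " ++ name ++ " - " ++ description)],
       st.2 ++ [name ++ " at line " ++ PySem.Int.toStr (position + 1) ++ ": " ++ description]))
    ([], [])
  (PySem.Str.join "\n" (pvMerge st.1 orig 0), st.2)

-- ===== PRECONDITION & SPEC =====
-- Pre_ excludes exactly the inputs on which Python A raises KeyError: some error dict
-- missing one of the keys "type", "name", "description".
def Pre_inject_errors_programmatically_py (code : String) (errors : List (List (String × String))) : Prop :=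
  ∀ e ∈ errors, (PySem.Dict.mk e).contains "type" = true ∧ (PySem.Dict.mk e).contains "name" = true ∧ (PySem.Dict.mk e).contains "description" = true
instance (code : String) (errors : List (List (String × String))) : Decidable (Pre_inject_errors_programmatically_py code errors) := by unfold Pre_inject_errors_programmatically_py; infer_instance

def pvWitness_inject_errors_programmatically_py : String × (List (List (String × String))) :=
  ("int x;\nint y;", [[("type", "logical"), ("name", "NPE"), ("description", "missing null check")]])

def Spec_inject_errors_programmatically_py (code : String) (errors : List (List (String × String))) (out : String × List String) : Prop := out = inject_errors_programmatically_py_alt code errors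
instance (code : String) (errors : List (List (String × String))) (out : String × List String) : Decidable (Spec_inject_errors_programmatically_py code errors out) := by unfold Spec_inject_errors_programmatically_py; infer_instance

-- ===== CLAIM (what is proved, stated in full; the proofs are below) =====
def Claim_equal_inject_errors_programmatically_py : Prop := ∀ (code : String) (errors : List (List (String × String))), Dom_inject_errors_programmatically_py code errors → Pre_inject_errors_programmatically_py code errors → Spec_inject_errors_programmatically_py code errors (inject_errors_programmatically_py code errors)

-- ===== LEMMAS AND PROOFS =====

-- Proof-side twin of the merge pass, recursive on the data instead of the counter.
def pvMergeR (pairs : List (Int × String)) (orig : List String) (j : Int) : List String :=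
  match pairs, orig with
  | (p, c) :: ps, o =>
      if p = j then c :: pvMergeR ps o (j + 1)
      else
        match o with
        | x :: os => x :: pvMergeR ((p, c) :: ps) os (j + 1)
        | [] => c :: pvMergeR ps [] (j + 1)
  | [], x :: os => x :: pvMergeR [] os (j + 1)
  | [], [] => []
termination_by pairs.length + orig.length
decreasing_by all_goals (simp [List.length_cons]; try omega)

theorem pvMergeGo_eq_R (pairs : List (Int × String)) (orig : List String) (j : Int) :
    ∀ fuel : Nat, pairs.length + orig.length ≤ fuel → pvMergeGo fuel pairs orig j = pvMergeR pairs orig j := by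
  fun_induction pvMergeR pairs orig j with
  | case1 p c ps o ih =>
    intro fuel hf
    match fuel with
    | 0 => simp at hf
    | Nat.succ f =>
      rw [pvMergeGo.eq_def]
      simp [ih f (by simp at hf ⊢; omega)]
  | case2 j p c ps hne x os ih =>
    intro fuel hf
    match fuel with
    | 0 => simp at hf
    | Nat.succ f =>
      rw [pvMergeGo.eq_def]
      conv_rhs => rw [pvMergeR.eq_def]
      simp [hne, ih f (by simp at hf ⊢; omega)]
      all_goals rw [pvMergeR.eq_def]
  | case3 j p c ps hne ih =>
    intro fuel hf
    match fuel with
    | 0 => simp at hf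
    | Nat.succ f =>
      rw [pvMergeGo.eq_def]
      conv_rhs => rw [pvMergeR.eq_def]
      simp [hne, ih f (by simp at hf ⊢; omega)]
      all_goals rw [pvMergeR.eq_def]
  | case4 j x os ih =>
    intro fuel hf
    match fuel with
    | 0 => simp at hf
    | Nat.succ f =>
      rw [pvMergeGo.eq_def]
      conv_rhs => rw [pvMergeR.eq_def]
      simp [ih f (by simp at hf ⊢; omega)]
      all_goals rw [pvMergeR.eq_def]
  | case5 j =>
    intro fuel _
    match fuel with
    | 0 => rw [pvMergeGo.eq_def]
    | Nat.succ f => rw [pvMergeGo.eq_def]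

theorem pvMerge_eq_R (pairs : List (Int × String)) (orig : List String) (j : Int) :
    pvMerge pairs orig j = pvMergeR pairs orig j :=
  pvMergeGo_eq_R pairs orig j _ (Nat.le_refl _)

-- Strictly increasing positions, all at or after index j.
def pvGood : Int → List Int → Prop
  | _, [] => True
  | j, p :: ps => j ≤ p ∧ pvGood (p + 1) ps

-- Structural facts about the merge pass.
theorem pvMergeR_nil (orig : List String) (j : Int) : pvMergeR [] orig j = orig := by
  induction orig generalizing j with
  | nil => simp [pvMergeR]
  | cons x os ih => simp [pvMergeR, ih]

theorem pvMergeR_length (ps : List (Int × String)) (orig : List String) (j : Int) :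
    (pvMergeR ps orig j).length = ps.length + orig.length := by
  fun_induction pvMergeR ps orig j <;> simp_all <;> omega

theorem pvGood_last (ps : List Int) : ∀ (j p : Int), pvGood j (ps ++ [p]) → j + ps.length ≤ p := by
  induction ps with
  | nil => intro j p h; simpa [pvGood] using h.1
  | cons q qs ih =>
    intro j p h
    simp only [List.cons_append, pvGood] at h
    have := ih (q + 1) p h.2
    simp; omega

theorem pvInsert_cons_pos {α : Type} (x : α) (xs : List α) (i : Int) (v : α)
    (h1 : 1 ≤ i) (h2 : i ≤ xs.length + 1) :
    PySem.List.insert (x :: xs) i v = x :: PySem.List.insert xs (i - 1) v := by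
  obtain ⟨n, rfl⟩ : ∃ n : Nat, i = (n : Int) := ⟨i.toNat, by omega⟩
  have hn1 : (n : Int) - 1 = ((n - 1 : Nat) : Int) := by omega
  rw [hn1,
    PySem.List.insert_natCast (x :: xs) n v (by simp; omega),
    PySem.List.insert_natCast xs (n - 1) v (by omega)]
  have hsucc : n = (n - 1) + 1 := by omega
  rw [hsucc, List.take_succ_cons, List.drop_succ_cons]
  simp

theorem pvInsert_mergeR (ps : List (Int × String)) (orig : List String) (j pp : Int) (cc : String)
    (hg : pvGood j (ps.map Prod.fst ++ [pp]))
    (hb : pp < j + ps.length + orig.length) :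
    PySem.List.insert (pvMergeR ps orig j) (pp - j) cc = pvMergeR (ps ++ [(pp, cc)]) orig j := by
  fun_induction pvMergeR ps orig j with
  | case1 p c ps o ih =>
    have hlast := pvGood_last (List.map Prod.fst ((p,c)::ps)) p pp hg
    have hlen := pvMergeR_length ps o (p+1)
    rw [pvInsert_cons_pos c (pvMergeR ps o (p+1)) (pp - p) cc
      (by simp at hlast; omega) (by rw [hlen]; simp at hb ⊢; omega)]
    have hg2 : pvGood (p+1) (ps.map Prod.fst ++ [pp]) := by
      simp only [List.map_cons, List.cons_append, pvGood] at hg; exact hg.2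
    have hrec := ih hg2 (by simp at hb ⊢; omega)
    have hp1 : pp - p - 1 = pp - (p + 1) := by omega
    rw [hp1, hrec]
    conv_rhs => rw [pvMergeR.eq_def]
    simp
  | case2 j p c ps hne x os ih =>
    have hlast := pvGood_last (List.map Prod.fst ((p,c)::ps)) j pp hg
    have hlen := pvMergeR_length ((p,c)::ps) os (j+1)
    rw [pvInsert_cons_pos x (pvMergeR ((p,c)::ps) os (j+1)) (pp - j) cc
      (by simp at hlast; omega) (by rw [hlen]; simp at hb ⊢; omega)]
    have hg2 : pvGood (j+1) (((p,c)::ps).map Prod.fst ++ [pp]) := by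
      simp only [List.map_cons, List.cons_append, pvGood] at hg ⊢
      exact ⟨by omega, hg.2⟩
    have hrec := ih hg2 (by simp at hb ⊢; omega)
    have hp1 : pp - j - 1 = pp - (j + 1) := by omega
    rw [hp1, hrec]
    conv_rhs => rw [pvMergeR.eq_def]
    simp [hne]
  | case3 j p c ps hne ih =>
    have hlast := pvGood_last (List.map Prod.fst ((p,c)::ps)) j pp hg
    simp at hlast hb
    omega
  | case4 j x os ih =>
    by_cases hpj : pp = j
    · subst hpj
      rw [sub_self, PySem.List.insert_zero]
      conv_rhs => rw [pvMergeR.eq_def]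
      simp [pvMergeR_nil]
    · have hle : j ≤ pp := by simpa [pvGood] using hg.1
      rw [pvInsert_cons_pos x (pvMergeR [] os (j+1)) (pp - j) cc
        (by omega) (by rw [pvMergeR_length]; simp at hb ⊢; omega)]
      have hg2 : pvGood (j+1) (([] : List (Int × String)).map Prod.fst ++ [pp]) := by
        simp [pvGood]; omega
      have hrec := ih hg2 (by simp at hb ⊢; omega)
      have hp1 : pp - j - 1 = pp - (j + 1) := by omega
      rw [hp1, hrec]
      conv_rhs => rw [pvMergeR.eq_def]
      simp [hpj]
  | case5 j =>
    have hle : j ≤ pp := by simpa [pvGood] using hg.1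
    simp at hb
    omega

-- The canonical position of the i-th comment.
def pvPosF (base : Int) (k : Nat) : Int := min (5 + 3 * (k : Int)) (base + (k : Int) - 1)

theorem pvGood_posF (base : Int) (_hb : 1 ≤ base) : ∀ (n a : Nat) (j : Int),
    j ≤ pvPosF base a → pvGood j ((List.range' a n).map (pvPosF base)) := by
  intro n
  induction n with
  | zero => intro a j _; simp [pvGood]
  | succ m ih =>
    intro a j hj
    simp only [List.range'_succ, List.map_cons, pvGood]
    refine ⟨hj, ih (a + 1) _ ?_⟩
    simp only [pvPosF] at *
    push_cast
    omega

-- code.split("\n") is never empty: splitOn.go always returns at least acc.length + 1 pieces.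
theorem pvSplitGo_len : ∀ (fuel : Nat) (sep l cur : List Char) (acc : List (List Char)),
    acc.length < (PySem.Chars.splitOn.go sep fuel l cur acc).length := by
  intro fuel
  induction fuel with
  | zero => intro sep l cur acc; simp [PySem.Chars.splitOn.go]
  | succ m ih =>
    intro sep l cur acc
    match l with
    | [] => simp [PySem.Chars.splitOn.go]
    | c :: rest =>
      rw [PySem.Chars.splitOn.go]
      by_cases hpre : sep.isPrefixOf (c :: rest) = true
      · simp only [hpre, if_true]
        have := ih sep (List.drop sep.length (c :: rest)) [] (cur.reverse :: acc)
        simp at this ⊢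
        omega
      · simp only [hpre, if_false, Bool.false_eq_true]
        exact ih sep rest (c :: cur) acc

theorem pvLines_ne_nil (code : String) :
    1 ≤ ((PySem.Str.split? code "\n").getD []).length := by
  simp only [PySem.Str.split?, PySem.Chars.split?]
  have h1 : ("\n" : String).toList = ['\n'] := by decide
  rw [h1]
  simp only [List.isEmpty_cons, Bool.false_eq_true, if_false]
  simp only [Option.map_some, Option.getD_some, List.length_map]
  have := pvSplitGo_len (code.toList.length + 1) ['\n'] code.toList [] []
  simpa [PySem.Chars.splitOn] using this

-- MAIN LOOP INVARIANT: A's fold state is B's fold state with the pairs merged in.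
theorem pvLoop (orig : List String) (h1 : 1 ≤ orig.length) :
    ∀ (errs : List (List (String × String))) (i : Nat) (P : List (Int × String)) (D : List String),
    P.map Prod.fst = (List.range' 0 i).map (pvPosF (orig.length : Int)) →
    (PySem.List.enumerate errs (i : Int)).foldl
      (fun (st : List String × List String) ie =>
        let i := ie.1
        let error := PySem.Dict.mk ie.2
        let _error_type := (error.get? "type").getD ""
        let name := (error.get? "name").getD ""
        let description := (error.get? "description").getD ""
        let position := min (5 + i * 3) (PySem.List.len st.1 - 1)
        let error_comment := "// ERROR: " ++ name ++ " - " ++ description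
        let lines' := PySem.List.insert st.1 position error_comment
        let line_number := position + 1
        (lines', st.2 ++ [name ++ " at line " ++ PySem.Int.toStr line_number ++ ": " ++ description]))
      (pvMergeR P orig 0, D)
    = (fun (st : List (Int × String) × List String) => (pvMergeR st.1 orig 0, st.2))
      ((PySem.List.enumerate errs (i : Int)).foldl
        (fun (st : List (Int × String) × List String) ie =>
          let i := ie.1
          let error := PySem.Dict.mk ie.2
          let name := (error.get? "name").getD ""
          let description := (error.get? "description").getD ""
          let position := min (5 + 3 * i) ((PySem.List.len orig) + i - 1)
          (st.1 ++ [(position, "// ERROR: " ++ name ++ " - " ++ description)],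
           st.2 ++ [name ++ " at line " ++ PySem.Int.toStr (position + 1) ++ ": " ++ description]))
        (P, D)) := by
  intro errs
  induction errs with
  | nil => intro i P D _; simp [PySem.List.enumerate]
  | cons e rest ihe =>
    intro i P D hP
    have hPlen : P.length = i := by
      have := congrArg List.length hP; simpa using this
    have hMlen := pvMergeR_length P orig 0
    rw [PySem.List.enumerate_cons]
    simp only [List.foldl_cons]
    have hbase1 : (1 : Int) ≤ (orig.length : Int) := by exact_mod_cast h1
    -- the two computed positions agree with pvPosF (orig.length) i
    have hposA : min (5 + (i : Int) * 3) (PySem.List.len (pvMergeR P orig 0) - 1)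
        = pvPosF (orig.length : Int) i := by
      rw [PySem.List.len_eq, hMlen, hPlen]
      simp only [pvPosF]
      push_cast
      omega
    have hposB : min (5 + 3 * (i : Int)) ((PySem.List.len orig) + (i : Int) - 1)
        = pvPosF (orig.length : Int) i := by
      rw [PySem.List.len_eq]
      simp only [pvPosF]
    simp only [hposA, hposB]
    set p := pvPosF (orig.length : Int) i with hp
    set cmt := "// ERROR: " ++ ((PySem.Dict.mk e).get? "name").getD "" ++ " - " ++ ((PySem.Dict.mk e).get? "description").getD "" with hcmt
    have hgood : pvGood 0 ((P.map Prod.fst) ++ [p]) := by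
      rw [hP, hp]
      have hconcat : (List.range' 0 i).map (pvPosF (orig.length : Int)) ++ [pvPosF (orig.length : Int) i]
          = (List.range' 0 (i + 1)).map (pvPosF (orig.length : Int)) := by
        rw [List.range'_concat, List.map_append]; simp
      rw [hconcat]
      exact pvGood_posF _ hbase1 (i + 1) 0 0 (by simp [pvPosF]; omega)
    have hins : PySem.List.insert (pvMergeR P orig 0) p cmt = pvMergeR (P ++ [(p, cmt)]) orig 0 := by
      have := pvInsert_mergeR P orig 0 p cmt
        (by simpa using hgood) (by simp [hp, pvPosF]; try omega)
      simpa using this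
    rw [hins]
    have hcast : ((i : Int) + 1) = ((i + 1 : Nat) : Int) := by push_cast; ring
    rw [hcast]
    exact ihe (i + 1) (P ++ [(p, cmt)]) _
      (by rw [List.map_append, hP, List.range'_concat]; simp [hp])

-- ===== VERDICT (by name: the statement is the Claim_ definition above) =====
theorem inject_errors_programmatically_py_spec : Claim_equal_inject_errors_programmatically_py := by
  unfold Claim_equal_inject_errors_programmatically_py
  intro code errors _ _
  unfold Spec_inject_errors_programmatically_py
  have h1 := pvLines_ne_nil code
  have key := pvLoop ((PySem.Str.split? code "\n").getD []) h1 errors 0 [] [] (by simp)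
  rw [pvMergeR_nil] at key
  simp only [Nat.cast_zero] at key
  simp only [inject_errors_programmatically_py, inject_errors_programmatically_py_alt]
  rw [key, pvMerge_eq_R]
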